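-- pv_equiv track=rewrite | github.com/Kryko7/AoC | AoC2024_9/AoC2024_9.py | swapping
-- ===== SOURCE A (Python) =====
-- def swapping(res):
--     left = 0
--     right = len(res) - 1
--     while left < right:
--         while left < right and res[left] != -1:
--             left += 1
--         while left < right and res[right] == -1:
--             right -= 1
--         if left < right:
--             res[left], res[right] = res[right], res[left]
--             left += 1
--             right -= 1
--     return res
-- ===== SOURCE B (Python) =====
-- def swapping(res):
--     gaps = [i for i in range(len(res)) if res[i] == -1]
--     vals = [i for i in range(len(res) - 1, -1, -1) if res[i] != -1]
--     for g, v in zip(gaps, vals):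
--         if g >= v:
--             break
--         res[g], res[v] = res[v], res[g]
--     return res
-- ===== Notes on version B (the rewrite author's own statement) =====
-- stated objective: alternative
-- what changed: Replaces the interleaved two-pointer scan (nested while loops advancing left/right through the array) by precomputing the ascending gap-index list and descending value-index list once, then performing the swaps by folding over their zip until the indices cross.
import Mathlib
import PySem

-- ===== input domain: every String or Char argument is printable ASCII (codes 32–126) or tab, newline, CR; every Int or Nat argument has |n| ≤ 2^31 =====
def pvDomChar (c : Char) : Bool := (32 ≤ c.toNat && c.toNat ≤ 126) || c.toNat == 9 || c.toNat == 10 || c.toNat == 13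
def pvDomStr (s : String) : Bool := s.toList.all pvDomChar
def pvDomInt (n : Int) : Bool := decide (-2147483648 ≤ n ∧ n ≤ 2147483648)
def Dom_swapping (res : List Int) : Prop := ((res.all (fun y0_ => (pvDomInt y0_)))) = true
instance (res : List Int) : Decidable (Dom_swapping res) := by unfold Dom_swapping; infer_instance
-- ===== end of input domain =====

-- B replaces A's interleaved two-pointer scan by precomputed gap/value index lists zipped
-- together (objective: alternative decomposition, same cost). Both Pythons mutate res in
-- place and return that same object; the equivalence proved here is about the return value.

-- ===== PORT A =====
-- inner 'while left < right and res[left] != -1: left += 1'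
def swapSkipLeft (res : List Int) (l r : Int) : Int :=
  if _h : l < r ∧ PySem.List.pyGetD res l 0 ≠ -1 then swapSkipLeft res (l + 1) r else l
termination_by (r - l).toNat
decreasing_by omega

-- inner 'while left < right and res[right] == -1: right -= 1'
def swapSkipRight (res : List Int) (l r : Int) : Int :=
  if _h : l < r ∧ PySem.List.pyGetD res r 0 = -1 then swapSkipRight res l (r - 1) else r
termination_by (r - l).toNat
decreasing_by omega

theorem swapSkipLeft_ge (res : List Int) (l r : Int) : l ≤ swapSkipLeft res l r := by
  unfold swapSkipLeft
  split
  · exact le_trans (by omega) (swapSkipLeft_ge res (l + 1) r)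
  · exact le_refl l
termination_by (r - l).toNat
decreasing_by omega

theorem swapSkipRight_le (res : List Int) (l r : Int) : swapSkipRight res l r ≤ r := by
  unfold swapSkipRight
  split
  · exact le_trans (swapSkipRight_le res l (r - 1)) (by omega)
  · exact le_refl r
termination_by (r - l).toNat
decreasing_by omega

-- outer 'while left < right' loop
def swapLoop (res : List Int) (l r : Int) : List Int :=
  -- left' = left after the first inner while, right' = right after the second inner while
  if h : l < r then
    if h2 : swapSkipLeft res l r < swapSkipRight res (swapSkipLeft res l r) r then
      swapLoop
        (PySem.List.pySetD
          (PySem.List.pySetD res (swapSkipLeft res l r)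
            (PySem.List.pyGetD res (swapSkipRight res (swapSkipLeft res l r) r) 0))
          (swapSkipRight res (swapSkipLeft res l r) r)
          (PySem.List.pyGetD res (swapSkipLeft res l r) 0))
        (swapSkipLeft res l r + 1) (swapSkipRight res (swapSkipLeft res l r) r - 1)
    else res
  else res
termination_by (r - l).toNat
decreasing_by
  have h3 : l ≤ swapSkipLeft res l r := swapSkipLeft_ge res l r
  have h4 : swapSkipRight res (swapSkipLeft res l r) r ≤ r :=
    swapSkipRight_le res (swapSkipLeft res l r) r
  omega

def swapping (res : List Int) : List Int :=
  swapLoop res 0 (PySem.List.len res - 1)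

-- ===== PORT B =====
-- 'for g, v in zip(gaps, vals): if g >= v: break; swap'
def swapPairs (res : List Int) : List (Int × Int) → List Int
  | [] => res
  | (g, v) :: rest =>
    if g ≥ v then res
    else
      swapPairs
        (PySem.List.pySetD (PySem.List.pySetD res g (PySem.List.pyGetD res v 0)) v
          (PySem.List.pyGetD res g 0))
        rest

def swapping_alt (res : List Int) : List Int :=
  let gaps := (PySem.List.pyRange 0 (PySem.List.len res) 1).filter
    (fun i => PySem.List.pyGetD res i 0 == -1)
  let vals := (PySem.List.pyRange (PySem.List.len res - 1) (-1) (-1)).filter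
    (fun i => PySem.List.pyGetD res i 0 != -1)
  swapPairs res (gaps.zip vals)

-- ===== PRECONDITION & SPEC =====
def Spec_swapping (res : List Int) (out : List Int) : Prop := out = swapping_alt res
instance (res : List Int) (out : List Int) : Decidable (Spec_swapping res out) := by unfold Spec_swapping; infer_instance

-- ===== CLAIM (what is proved, stated in full; the proofs are below) =====
def Claim_equal_swapping : Prop := ∀ (res : List Int), Dom_swapping res → Spec_swapping res (swapping res)

-- ===== LEMMAS AND PROOFS =====

theorem swapSkipLeft_eq_of (res : List Int) (l r t : Int) (hl : l ≤ t) (ht : t ≤ r)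
    (hstop : t = r ∨ PySem.List.pyGetD res t 0 = -1)
    (hskip : ∀ i, l ≤ i → i < t → PySem.List.pyGetD res i 0 ≠ -1) :
    swapSkipLeft res l r = t := by
  rcases eq_or_lt_of_le hl with heq | hlt
  · subst heq
    unfold swapSkipLeft
    rw [dif_neg]
    rcases hstop with h | h
    · omega
    · simp [h]
  · rw [swapSkipLeft]
    rw [dif_pos ⟨by omega, hskip l le_rfl hlt⟩]
    exact swapSkipLeft_eq_of res (l + 1) r t (by omega) ht hstop
      (fun i h1 h2 => hskip i (by omega) h2)
termination_by (t - l).toNat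
decreasing_by omega

theorem swapSkipRight_eq_of (res : List Int) (l r t : Int) (hl : l ≤ t) (ht : t ≤ r)
    (hstop : t = l ∨ PySem.List.pyGetD res t 0 ≠ -1)
    (hskip : ∀ i, t < i → i ≤ r → PySem.List.pyGetD res i 0 = -1) :
    swapSkipRight res l r = t := by
  rcases eq_or_lt_of_le ht with heq | hlt
  · subst heq
    unfold swapSkipRight
    rw [dif_neg]
    rcases hstop with h | h
    · omega
    · simp [h]
  · rw [swapSkipRight]
    rw [dif_pos ⟨by omega, hskip r hlt le_rfl⟩]
    exact swapSkipRight_eq_of res l (r - 1) t hl (by omega) hstop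
      (fun i h1 h2 => hskip i h1 (by omega))
termination_by (r - t).toNat
decreasing_by omega

-- a nonnegative-index set leaves every other nonnegative index unchanged
theorem pyGetD_pySetD_ne (xs : List Int) (i j w d : Int) (hi : 0 ≤ i) (hj : 0 ≤ j)
    (hne : i ≠ j) :
    PySem.List.pyGetD (PySem.List.pySetD xs j w) i d = PySem.List.pyGetD xs i d := by
  rw [PySem.List.pySetD_of_nonneg xs w hj, PySem.List.pyGetD_of_nonneg _ d hi,
    PySem.List.pyGetD_of_nonneg _ d hi]
  simp only [List.getD]
  rw [List.getElem?_set_ne (by omega)]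

-- the double update of a swap leaves indices other than g and v unchanged
theorem pyGetD_swap_ne (res : List Int) (g v i d : Int) (hi : 0 ≤ i) (hg : 0 ≤ g)
    (hv : 0 ≤ v) (hig : i ≠ g) (hiv : i ≠ v) :
    PySem.List.pyGetD
      (PySem.List.pySetD (PySem.List.pySetD res g (PySem.List.pyGetD res v 0)) v
        (PySem.List.pyGetD res g 0)) i d = PySem.List.pyGetD res i d := by
  rw [pyGetD_pySetD_ne _ _ _ _ _ hi hv hiv, pyGetD_pySetD_ne _ _ _ _ _ hi hg hig]

-- the core simulation: A's pointer loop equals B's fold over the zipped index lists,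
-- for any index lists satisfying the stated soundness / completeness / order invariants
theorem swapLoop_eq_swapPairs (m : Nat) : ∀ (res : List Int) (l r : Int)
    (gs vs : List Int),
    (r - l).toNat ≤ m → 0 ≤ l →
    gs.Pairwise (· < ·) → vs.Pairwise (· > ·) →
    (∀ i ∈ gs, l ≤ i ∧ (i ≤ r → PySem.List.pyGetD res i 0 = -1)) →
    (∀ i ∈ vs, i ≤ r ∧ (l ≤ i → PySem.List.pyGetD res i 0 ≠ -1)) →
    (∀ i, l ≤ i → i ≤ r → PySem.List.pyGetD res i 0 = -1 → i ∈ gs) →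
    (∀ i, l ≤ i → i ≤ r → PySem.List.pyGetD res i 0 ≠ -1 → i ∈ vs) →
    swapLoop res l r = swapPairs res (gs.zip vs) := by
  induction m with
  | zero =>
    intro res l r gs vs hm hl0 _ _ hgS hvS _ _
    have hlr : ¬ l < r := by omega
    unfold swapLoop
    rw [dif_neg hlr]
    cases gs with
    | nil => rfl
    | cons g gs' =>
      cases vs with
      | nil => rfl
      | cons v vs' =>
        have h1 := (hgS g (by simp)).1
        have h2 := (hvS v (by simp)).1
        simp only [List.zip_cons_cons, swapPairs]
        rw [if_pos (by omega)]
  | succ m ih =>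
    intro res l r gs vs hm hl0 hgP hvP hgS hvS hgC hvC
    by_cases hlr : l < r
    case neg =>
      unfold swapLoop
      rw [dif_neg hlr]
      cases gs with
      | nil => rfl
      | cons g gs' =>
        cases vs with
        | nil => rfl
        | cons v vs' =>
          have h1 := (hgS g (by simp)).1
          have h2 := (hvS v (by simp)).1
          simp only [List.zip_cons_cons, swapPairs]
          rw [if_pos (by omega)]
    case pos =>
      cases gs with
      | nil =>
        -- no gaps at or after l: left pointer runs to r, loop ends with no swap
        have hnog : ∀ i, l ≤ i → i < r → PySem.List.pyGetD res i 0 ≠ -1 := by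
          intro i h1 h2 hcon
          exact absurd (hgC i h1 (by omega) hcon) (List.not_mem_nil)
        unfold swapLoop
        rw [dif_pos hlr]
        rw [swapSkipLeft_eq_of res l r r (by omega) le_rfl (Or.inl rfl) hnog]
        rw [swapSkipRight_eq_of res r r r le_rfl le_rfl (Or.inl rfl) (by omega)]
        simp [swapPairs]
      | cons g gs' =>
        cases vs with
        | nil =>
          -- no values at or before r: everything in [l, r] is -1, pointers meet at l
          have hall : ∀ i, l ≤ i → i ≤ r → PySem.List.pyGetD res i 0 = -1 := by
            intro i h1 h2
            by_contra hcon
            exact absurd (hvC i h1 h2 hcon) (List.not_mem_nil)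
          unfold swapLoop
          rw [dif_pos hlr]
          rw [swapSkipLeft_eq_of res l r l le_rfl (by omega)
            (Or.inr (hall l le_rfl (by omega))) (by omega)]
          rw [swapSkipRight_eq_of res l r l le_rfl (by omega) (Or.inl rfl)
            (fun i h1 h2 => hall i (by omega) h2)]
          simp [swapPairs]
        | cons v vs' =>
          have hgl : l ≤ g := (hgS g (by simp)).1
          have hvr : v ≤ r := (hvS v (by simp)).1
          have hgmin : ∀ i ∈ gs', g < i := by
            intro i hi; exact (List.pairwise_cons.mp hgP).1 i hi
          have hvmax : ∀ i ∈ vs', i < v := by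
            intro i hi; exact (List.pairwise_cons.mp hvP).1 i hi
          have hnoGapBelow : ∀ i, l ≤ i → i < g → i ≤ r → PySem.List.pyGetD res i 0 ≠ -1 := by
            intro i h1 h2 h3 hcon
            rcases List.mem_cons.mp (hgC i h1 h3 hcon) with h | h
            · omega
            · exact absurd (hgmin i h) (by omega)
          have hallGapAbove : ∀ i, v < i → l ≤ i → i ≤ r → PySem.List.pyGetD res i 0 = -1 := by
            intro i h1 h2 h3
            by_contra hcon
            rcases List.mem_cons.mp (hvC i h2 h3 hcon) with h | h
            · omega
            · exact absurd (hvmax i h) (by omega)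
          by_cases hgv : g < v
          case pos =>
            -- a real swap: left stops at g, right stops at v
            have hgr : g < r := by omega
            have hgg : PySem.List.pyGetD res g 0 = -1 := (hgS g (by simp)).2 (by omega)
            have hvv : PySem.List.pyGetD res v 0 ≠ -1 := (hvS v (by simp)).2 (by omega)
            unfold swapLoop
            rw [dif_pos hlr]
            rw [swapSkipLeft_eq_of res l r g hgl (by omega) (Or.inr hgg)
              (fun i h1 h2 => hnoGapBelow i h1 h2 (by omega))]
            rw [swapSkipRight_eq_of res g r v (by omega) hvr (Or.inr hvv)
              (fun i h1 h2 => hallGapAbove i h1 (by omega) h2)]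
            simp only [List.zip_cons_cons, swapPairs]
            rw [dif_pos hgv, if_neg (by omega)]
            set res2 := PySem.List.pySetD (PySem.List.pySetD res g (PySem.List.pyGetD res v 0)) v
              (PySem.List.pyGetD res g 0) with hres2
            have hsame : ∀ i, 0 ≤ i → i ≠ g → i ≠ v →
                PySem.List.pyGetD res2 i 0 = PySem.List.pyGetD res i 0 := by
              intro i h1 h2 h3
              exact pyGetD_swap_ne res g v i 0 h1 (by omega) (by omega) h2 h3
            apply ih res2 (g + 1) (v - 1) gs' vs' (by omega) (by omega)
              (List.pairwise_cons.mp hgP).2 (List.pairwise_cons.mp hvP).2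
            · intro i hi
              have h1 := hgmin i hi
              have h2 := (hgS i (by simp [hi])).1
              refine ⟨by omega, fun h3 => ?_⟩
              rw [hsame i (by omega) (by omega) (by omega)]
              exact (hgS i (by simp [hi])).2 (by omega)
            · intro i hi
              have h1 := hvmax i hi
              have h2 := (hvS i (by simp [hi])).1
              refine ⟨by omega, fun h3 => ?_⟩
              rw [hsame i (by omega) (by omega) (by omega)]
              exact (hvS i (by simp [hi])).2 (by omega)
            · intro i h1 h2 h3
              rw [hsame i (by omega) (by omega) (by omega)] at h3
              rcases List.mem_cons.mp (hgC i (by omega) (by omega) h3) with h | h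
              · omega
              · exact h
            · intro i h1 h2 h3
              rw [hsame i (by omega) (by omega) (by omega)] at h3
              rcases List.mem_cons.mp (hvC i (by omega) (by omega) h3) with h | h
              · omega
              · exact h
          case neg =>
            -- crossed already: the loop finds nothing to swap and terminates
            unfold swapLoop
            rw [dif_pos hlr]
            by_cases hgr : g < r
            case pos =>
              have hgg : PySem.List.pyGetD res g 0 = -1 := (hgS g (by simp)).2 (by omega)
              rw [swapSkipLeft_eq_of res l r g hgl (by omega) (Or.inr hgg)
                (fun i h1 h2 => hnoGapBelow i h1 h2 (by omega))]
              rw [swapSkipRight_eq_of res g r g le_rfl (by omega) (Or.inl rfl)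
                (fun i h1 h2 => hallGapAbove i (by omega) (by omega) h2)]
              simp only [List.zip_cons_cons, swapPairs]
              rw [dif_neg (by omega), if_pos (by omega)]
            case neg =>
              rw [swapSkipLeft_eq_of res l r r (by omega) le_rfl (Or.inl rfl)
                (fun i h1 h2 => hnoGapBelow i h1 (by omega) (by omega))]
              rw [swapSkipRight_eq_of res r r r le_rfl le_rfl (Or.inl rfl) (by omega)]
              simp only [List.zip_cons_cons, swapPairs]
              rw [dif_neg (by omega), if_pos (by omega)]

-- ===== VERDICT (by name: the statement is the Claim_ definition above) =====
theorem swapping_spec : Claim_equal_swapping := by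
  intro res _
  unfold Spec_swapping swapping swapping_alt
  simp only []
  apply swapLoop_eq_swapPairs ((PySem.List.len res - 1).toNat) res 0
    (PySem.List.len res - 1) _ _ (by omega) le_rfl
  · exact (PySem.List.pairwise_lt_pyRange_one 0 (PySem.List.len res)).filter _
  · rw [PySem.List.pyRange_neg_one_eq_reverse]
    refine List.Pairwise.filter _ ?_
    rw [List.pairwise_reverse]
    have := PySem.List.pairwise_lt_pyRange_one (-1 + 1) (PySem.List.len res - 1 + 1)
    simpa using this
  · intro i hi
    simp only [List.mem_filter, PySem.List.mem_pyRange_one, beq_iff_eq] at hi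
    exact ⟨hi.1.1, fun _ => hi.2⟩
  · intro i hi
    simp only [List.mem_filter, PySem.List.mem_pyRange_neg_one, bne_iff_ne, ne_eq] at hi
    exact ⟨hi.1.2, fun _ => hi.2⟩
  · intro i h1 h2 h3
    simp only [List.mem_filter, PySem.List.mem_pyRange_one, beq_iff_eq]
    refine ⟨⟨h1, ?_⟩, h3⟩
    · have hlen : PySem.List.len res = (res.length : Int) := by simp [PySem.List.len_eq]
      omega
  · intro i h1 h2 h3
    simp only [List.mem_filter, PySem.List.mem_pyRange_neg_one, bne_iff_ne, ne_eq]
    exact ⟨⟨by omega, h2⟩, h3⟩
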